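-- pv_equiv track=rewrite | github.com/apachecom40net/cloud-discovery | cloud_detect.py | score_and_decide
-- ===== SOURCE A (Python) =====
-- def score_and_decide(signals):
--     """
--     signals: dict of provider -> list of hints
--     Simple scoring: number of distinct sources (DNS/ASN/HTTP/Cert) contributing.
--     """
--     scores = {}
--     for provider, hints in signals.items():
--         # Weight by unique hint categories
--         cats = set(h[0] for h in hints)  # "DNS", "CNAME", "ASN", "HTTP", "CERT", "PTR", "NS"
--         scores[provider] = len(cats) * 10 + len(hints)  # primary weight on sources
--     if not scores:
--         return None, 0
--     best = max(scores, key=scores.get)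
--     return best, scores[best]
-- ===== SOURCE B (Python) =====
-- def score_and_decide(signals):
--     best = None
--     for provider, hints in signals.items():
--         score = len({h[0] for h in hints}) * 10 + len(hints)
--         if best is None or score > best[1]:
--             best = (provider, score)
--     return (None, 0) if best is None else best
-- ===== Notes on version B (the rewrite author's own statement) =====
-- stated objective: simpler
-- what changed: Replaces the intermediate scores dict plus a separate max(scores, key=scores.get) pass with a single pass over signals.items() that keeps a running (provider, score) best, using strict > to preserve first-wins tie-breaking.
import Mathlib
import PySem

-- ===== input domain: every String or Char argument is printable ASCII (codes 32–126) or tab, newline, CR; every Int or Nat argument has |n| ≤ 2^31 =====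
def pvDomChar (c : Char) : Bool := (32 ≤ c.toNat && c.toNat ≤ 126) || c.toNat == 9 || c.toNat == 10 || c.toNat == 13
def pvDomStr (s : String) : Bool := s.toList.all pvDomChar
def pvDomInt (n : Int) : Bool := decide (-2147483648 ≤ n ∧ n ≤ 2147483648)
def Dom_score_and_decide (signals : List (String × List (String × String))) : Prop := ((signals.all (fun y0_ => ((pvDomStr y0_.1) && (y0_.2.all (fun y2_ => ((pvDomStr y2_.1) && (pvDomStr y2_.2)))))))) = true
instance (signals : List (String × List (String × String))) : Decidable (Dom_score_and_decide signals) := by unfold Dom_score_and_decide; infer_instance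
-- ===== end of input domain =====

-- B replaces A's scores-dict + separate max(scores, key=scores.get) pass with one pass keeping a running best (simpler, O(1) extra space).

-- ===== PORT A =====
-- scores[provider] = len(set(h[0] for h in hints)) * 10 + len(hints), then max(scores, key=scores.get)
def score_and_decide (signals : List (String × List (String × String))) : Option String × Int :=
  let scores : PySem.Dict String Int :=
    signals.foldl (fun d pv =>
      let cats : PySem.Set String := PySem.Set.ofList (pv.2.map (fun h => h.1))
      d.insert pv.1 ((cats.length : Int) * 10 + (pv.2.length : Int))) PySem.Dict.empty
  if scores.items = [] then (none, 0)
  else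
    match PySem.List.max? scores.keys (fun k => scores.getD k 0) with
    | some best => (some best, scores.getD best 0)
    | none => (none, 0)   -- unreachable: scores is non-empty here

-- ===== PORT B =====
def score_and_decide_alt (signals : List (String × List (String × String))) : Option String × Int :=
  let best := signals.foldl (fun best pv =>
      let score : Int := ((PySem.Set.ofList (pv.2.map (fun h => h.1))).length : Int) * 10 + (pv.2.length : Int)
      match best with
      | none => some (pv.1, score)
      | some b => if score > b.2 then some (pv.1, score) else some b) none
  match best with
  | none => (none, 0)
  | some b => (some b.1, b.2)

-- ===== PRECONDITION & SPEC =====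
-- Pre_ excludes association lists with duplicate provider keys: A's argument is a Python dict, whose keys are
-- unique by construction, so the list-level behaviour on duplicates is an accident of the encoding.
def Pre_score_and_decide (signals : List (String × List (String × String))) : Prop :=
  (signals.map Prod.fst).Nodup
instance (signals : List (String × List (String × String))) : Decidable (Pre_score_and_decide signals) := by unfold Pre_score_and_decide; infer_instance

def pvWitness_score_and_decide : (List (String × List (String × String))) :=
  [("aws", [("DNS", "x"), ("ASN", "y"), ("DNS", "z")]), ("gcp", [("HTTP", "u")])]

def Spec_score_and_decide (signals : List (String × List (String × String))) (out : Option String × Int) : Prop := out = score_and_decide_alt signals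
instance (signals : List (String × List (String × String))) (out : Option String × Int) : Decidable (Spec_score_and_decide signals out) := by unfold Spec_score_and_decide; infer_instance

-- ===== CLAIM (what is proved, stated in full; the proofs are below) =====
def Claim_equal_score_and_decide : Prop := ∀ (signals : List (String × List (String × String))), Dom_score_and_decide signals → Pre_score_and_decide signals → Spec_score_and_decide signals (score_and_decide signals)

-- ===== LEMMAS AND PROOFS =====

-- the per-provider score both programs compute
def pvScore (pv : String × List (String × String)) : Int :=
  ((PySem.Set.ofList (pv.2.map (fun h => h.1))).length : Int) * 10 + (pv.2.length : Int)

-- B's running-best step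
def pvStep (acc : Option (String × Int)) (p : String × Int) : Option (String × Int) :=
  match acc with
  | none => some p
  | some b => if p.2 > b.2 then some p else some b

-- Building the scores dict over fresh keys appends the (key, score) pairs in order.
theorem pvBuild (signals : List (String × List (String × String))) (d : PySem.Dict String Int)
    (hfresh : ∀ k ∈ signals.map Prod.fst, d.contains k = false)
    (hnd : (signals.map Prod.fst).Nodup) :
    (signals.foldl (fun d pv =>
      d.insert pv.1 (((PySem.Set.ofList (pv.2.map (fun h => h.1))).length : Int) * 10 + (pv.2.length : Int))) d).items
    = d.items ++ signals.map (fun pv => (pv.1, pvScore pv)) := by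
  induction signals generalizing d with
  | nil => simp
  | cons pv rest ih =>
    simp only [List.foldl_cons, List.map_cons]
    have hc : d.contains pv.1 = false := hfresh pv.1 (by simp)
    have hins : (d.insert pv.1 (((PySem.Set.ofList (pv.2.map (fun h => h.1))).length : Int) * 10 + (pv.2.length : Int))).items
        = d.items ++ [(pv.1, pvScore pv)] := by
      simp [PySem.Dict.insert, hc, pvScore]
    have hfresh' : ∀ k ∈ rest.map Prod.fst,
        (d.insert pv.1 (((PySem.Set.ofList (pv.2.map (fun h => h.1))).length : Int) * 10 + (pv.2.length : Int))).contains k = false := by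
      intro k hk
      have hne : pv.1 ≠ k := by
        simp only [List.map_cons, List.nodup_cons] at hnd
        intro h; exact hnd.1 (h ▸ hk)
      have := hfresh k (by simp [hk])
      simp only [PySem.Dict.contains, hins, List.any_append, List.any_cons, List.any_nil,
        Bool.or_eq_false_iff] at this ⊢
      exact ⟨this, by simp [hne], trivial⟩
    rw [ih _ hfresh' (by simp only [List.map_cons, List.nodup_cons] at hnd; exact hnd.2), hins]
    simp

-- With nodup keys, lookup returns the paired value.
theorem pvLookup (ps : List (String × Int)) (hnd : (ps.map Prod.fst).Nodup)
    (p : String × Int) (hp : p ∈ ps) :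
    (PySem.Dict.mk ps).getD p.1 0 = p.2 := by
  induction ps with
  | nil => cases hp
  | cons q rest ih =>
    simp only [List.map_cons, List.nodup_cons] at hnd
    rcases List.mem_cons.mp hp with h | h
    · subst h; simp [PySem.Dict.getD, PySem.Dict.get?]
    · have hne : q.1 ≠ p.1 := by
        intro heq; exact hnd.1 (heq ▸ (List.mem_map_of_mem h))
      have := ih hnd.2 h
      simpa [PySem.Dict.getD, PySem.Dict.get?, List.find?_cons, hne] using this

-- The first-extremal fold over keys with a lookup key function mirrors the running-best fold over pairs.
theorem pvFoldCorr (ps : List (String × Int)) (g : String → Int)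
    (hg : ∀ p ∈ ps, g p.1 = p.2) (acc : Option (String × Int))
    (hacc : ∀ q, acc = some q → g q.1 = q.2) :
    List.foldl (fun a k => match a with
        | none => some k
        | some m => if g m < g k then some k else some m) (acc.map Prod.fst) (ps.map Prod.fst)
    = Option.map Prod.fst (List.foldl pvStep acc ps) := by
  induction ps generalizing acc with
  | nil => simp
  | cons p rest ih =>
    simp only [List.map_cons, List.foldl_cons]
    have hgp : g p.1 = p.2 := hg p (by simp)
    have hg' : ∀ q ∈ rest, g q.1 = q.2 := fun q hq => hg q (by simp [hq])
    cases acc with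
    | none =>
      simpa [pvStep] using ih hg' (some p) (by rintro q ⟨rfl⟩; exact hgp)
    | some b =>
      have hb : g b.1 = b.2 := hacc b rfl
      simp only [Option.map_some, pvStep, hgp, hb]
      by_cases h : b.2 < p.2
      · simp only [gt_iff_lt, if_pos h]
        exact ih hg' (some p) (by rintro q ⟨rfl⟩; exact hgp)
      · simp only [gt_iff_lt, if_neg h]
        exact ih hg' (some b) (by rintro q ⟨rfl⟩; exact hb)

-- The running-best fold yields an element of the list (or the accumulator).
theorem pvFoldMem (ps : List (String × Int)) (acc : Option (String × Int))
    (q : String × Int) (h : List.foldl pvStep acc ps = some q) : q ∈ ps ∨ acc = some q := by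
  induction ps generalizing acc with
  | nil => exact Or.inr h
  | cons p rest ih =>
    simp only [List.foldl_cons] at h
    rcases ih _ h with hq | hq
    · exact Or.inl (by simp [hq])
    · cases acc with
      | none => simp only [pvStep] at hq; exact Or.inl (by simp [← Option.some_inj.mp hq])
      | some b =>
        simp only [pvStep] at hq
        split at hq
        · exact Or.inl (by simp [← Option.some_inj.mp hq])
        · exact Or.inr hq

-- The running-best fold never forgets a some accumulator.
theorem pvFoldSome (ps : List (String × Int)) (b : String × Int) :
    (List.foldl pvStep (some b) ps).isSome := by
  induction ps generalizing b with
  | nil => rfl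
  | cons p rest ih =>
    simp only [List.foldl_cons, pvStep]
    split <;> exact ih _

-- ===== VERDICT (by name: the statement is the Claim_ definition above) =====
theorem score_and_decide_spec : Claim_equal_score_and_decide := by
  intro signals _ hpre
  have hnd : (signals.map Prod.fst).Nodup := hpre
  unfold Spec_score_and_decide
  simp only [score_and_decide, score_and_decide_alt]
  have hitems := pvBuild signals PySem.Dict.empty (fun k _ => rfl) hnd
  simp only [PySem.Dict.empty, List.nil_append] at hitems
  set ps := signals.map (fun pv => (pv.1, pvScore pv)) with hps
  set scores := signals.foldl (fun d pv =>
    d.insert pv.1 (((PySem.Set.ofList (pv.2.map (fun h => h.1))).length : Int) * 10 + (pv.2.length : Int))) PySem.Dict.empty with hscores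
  have hsi : scores.items = ps := hitems
  have hkeys : ps.map Prod.fst = signals.map Prod.fst := by
    simp [hps, Function.comp]
  have hndps : (ps.map Prod.fst).Nodup := by rw [hkeys]; exact hnd
  have hBfold : signals.foldl (fun best pv =>
      match best with
      | none => some (pv.1, ((PySem.Set.ofList (pv.2.map (fun h => h.1))).length : Int) * 10 + (pv.2.length : Int))
      | some b => if ((PySem.Set.ofList (pv.2.map (fun h => h.1))).length : Int) * 10 + (pv.2.length : Int) > b.2
          then some (pv.1, ((PySem.Set.ofList (pv.2.map (fun h => h.1))).length : Int) * 10 + (pv.2.length : Int))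
          else some b) none = List.foldl pvStep none ps := by
    rw [hps, List.foldl_map]
    rfl
  have hg : ∀ p ∈ ps, scores.getD p.1 0 = p.2 := by
    intro p hp
    have hmk : scores = PySem.Dict.mk ps := PySem.Dict.ext hsi
    rw [hmk]; exact pvLookup ps hndps p hp
  have hmax : PySem.List.max? scores.keys (fun k => scores.getD k 0)
      = Option.map Prod.fst (List.foldl pvStep none ps) := by
    have hkeys2 : scores.keys = ps.map Prod.fst := by
      simp [PySem.Dict.keys, hsi]
    rw [PySem.List.max?, hkeys2]
    have hc := pvFoldCorr ps (fun k => scores.getD k 0) (fun p hp => hg p hp) none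
      (by intro q h; cases h)
    simp only [Option.map_none] at hc
    rw [← hc]
    exact List.foldl_ext _ _ none (fun a x _ => by cases a <;> rfl)
  rw [hBfold, hmax]
  cases hres : List.foldl pvStep none ps with
  | none =>
    have hpsnil : ps = [] := by
      cases hq : ps with
      | nil => rfl
      | cons p rest =>
        exfalso
        have hsome := pvFoldSome rest p
        rw [hq, List.foldl_cons] at hres
        simp only [pvStep] at hres
        rw [hres] at hsome
        exact Bool.noConfusion hsome
    simp [hsi, hpsnil]
  | some b =>
    have hmem : b ∈ ps := by
      rcases pvFoldMem ps none b hres with h | h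
      · exact h
      · cases h
    have hne : scores.items ≠ [] := by
      rw [hsi]; intro h; rw [h] at hmem; cases hmem
    simp only [if_neg hne, Option.map_some]
    rw [hg b hmem]
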